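-- pv_equiv track=rewrite | github.com/vungocbinh2009/bookworm-adventure-helper | game.py | is_word_subset_input
-- ===== SOURCE A (Python) =====
-- from collections import Counter
-- from typing import List
--
-- def is_word_subset_input(input_letter: List[str], word: List[str], missing_limit=0):
--     # get counts of two lists
--     count_input = Counter(input_letter)
--     count_word = Counter(word)
--     missing = 0
--     for key in count_word:
--         if count_word[key] > count_input[key]:
--             missing += (count_word[key] - count_input[key])
--     return missing <= missing_limit
-- ===== SOURCE B (Python) =====
-- def is_word_subset_input(input_letter, word, missing_limit=0):
--     # Greedy consumption: take a working copy of the input letters and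
--     # cross off one copy for each word letter; uncrossable letters are missing.
--     avail = list(input_letter)
--     missing = 0
--     for w in word:
--         if w in avail:
--             avail.remove(w)
--         else:
--             missing += 1
--     return missing <= missing_limit
-- ===== Notes on version B (the rewrite author's own statement) =====
-- stated objective: alternative
-- what changed: Replaces the Counter-based per-distinct-letter deficit sum with a greedy pass over the word that consumes letters from a working copy of the input list, counting each unmatchable word letter directly.
import Mathlib
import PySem

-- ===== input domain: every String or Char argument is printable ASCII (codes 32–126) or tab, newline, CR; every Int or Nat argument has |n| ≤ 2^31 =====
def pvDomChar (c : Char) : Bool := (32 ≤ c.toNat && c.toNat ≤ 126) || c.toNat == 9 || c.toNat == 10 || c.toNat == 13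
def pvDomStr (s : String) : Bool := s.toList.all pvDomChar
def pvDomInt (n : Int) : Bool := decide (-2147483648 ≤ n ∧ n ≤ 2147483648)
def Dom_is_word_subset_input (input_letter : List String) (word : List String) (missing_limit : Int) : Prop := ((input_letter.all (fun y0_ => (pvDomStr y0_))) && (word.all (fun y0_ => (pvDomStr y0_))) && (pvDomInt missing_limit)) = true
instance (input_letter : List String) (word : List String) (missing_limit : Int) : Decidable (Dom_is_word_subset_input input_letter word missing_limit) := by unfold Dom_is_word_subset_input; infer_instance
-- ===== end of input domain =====

-- B replaces A's Counter-based deficit sum by a greedy pass that consumes letters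
-- from a working copy of the input list (alternative decomposition, similar cost).

-- ===== PORT A =====
def is_word_subset_input (input_letter : List String) (word : List String) (missing_limit : Int) : Bool :=
  let count_input := PySem.Dict.counter input_letter
  let count_word := PySem.Dict.counter word
  let missing : Int := count_word.keys.foldl
    (fun missing key =>
      if count_word.getD key 0 > count_input.getD key 0 then
        missing + (count_word.getD key 0 - count_input.getD key 0)
      else missing) 0
  decide (missing ≤ missing_limit)

-- ===== PORT B =====
-- the for-loop of Source B over `word` with state (avail, missing); `avail.remove(w)`
-- after the membership test is List.erase (first occurrence, as in Python)
def pvAltGo : List String → List String → Int → Int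
  | [], _, missing => missing
  | w :: rest, avail, missing =>
    if w ∈ avail then pvAltGo rest (avail.erase w) missing
    else pvAltGo rest avail (missing + 1)

def is_word_subset_input_alt (input_letter : List String) (word : List String) (missing_limit : Int) : Bool :=
  decide (pvAltGo word input_letter 0 ≤ missing_limit)

-- ===== PRECONDITION & SPEC =====
def Spec_is_word_subset_input (input_letter : List String) (word : List String) (missing_limit : Int) (out : Bool) : Prop := out = is_word_subset_input_alt input_letter word missing_limit
instance (input_letter : List String) (word : List String) (missing_limit : Int) (out : Bool) : Decidable (Spec_is_word_subset_input input_letter word missing_limit out) := by unfold Spec_is_word_subset_input; infer_instance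

-- ===== CLAIM (what is proved, stated in full; the proofs are below) =====
def Claim_equal_is_word_subset_input : Prop := ∀ (input_letter : List String) (word : List String) (missing_limit : Int), Dom_is_word_subset_input input_letter word missing_limit → Spec_is_word_subset_input input_letter word missing_limit (is_word_subset_input input_letter word missing_limit)

-- ===== LEMMAS AND PROOFS =====

-- multiset facts for the greedy loop
lemma pv_cons_sub_of_mem (w : String) (s t : Multiset String) (h : w ∈ t) :
    (w ::ₘ s) - t = s - t.erase w := by
  ext a
  have h1 : 1 ≤ t.count w := Multiset.one_le_count_iff_mem.mpr h
  by_cases hw : a = w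
  · subst hw
    simp [Multiset.count_sub, Multiset.count_cons_self, Multiset.count_erase_self]
    omega
  · simp [Multiset.count_sub, Multiset.count_cons_of_ne hw, Multiset.count_erase_of_ne hw]

lemma pv_cons_sub_of_not_mem (w : String) (s t : Multiset String) (h : w ∉ t) :
    (w ::ₘ s) - t = w ::ₘ (s - t) := by
  ext a
  have h0 : t.count w = 0 := Multiset.count_eq_zero.mpr h
  by_cases hw : a = w
  · subst hw
    simp [Multiset.count_sub, Multiset.count_cons_self, h0]
  · simp [Multiset.count_sub, Multiset.count_cons_of_ne hw]

-- the greedy loop computes the size of the multiset difference word - avail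
lemma pvAltGo_eq (word : List String) : ∀ (avail : List String) (m : Int),
    pvAltGo word avail m = m + (((word : Multiset String) - (avail : Multiset String)).card : Int) := by
  induction word with
  | nil => intro avail m; simp [pvAltGo]
  | cons w rest ih =>
    intro avail m
    by_cases hmem : w ∈ avail
    · have hms : (w : String) ∈ (avail : Multiset String) := by simpa using hmem
      rw [show ((w :: rest : List String) : Multiset String) = w ::ₘ (rest : Multiset String) from rfl]
      rw [pv_cons_sub_of_mem w _ _ hms]
      have : ((avail.erase w : List String) : Multiset String) = (avail : Multiset String).erase w := by
        simp
      simp only [pvAltGo, if_pos hmem, ih, this]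
    · have hms : (w : String) ∉ (avail : Multiset String) := by simpa using hmem
      rw [show ((w :: rest : List String) : Multiset String) = w ::ₘ (rest : Multiset String) from rfl]
      rw [pv_cons_sub_of_not_mem w _ _ hms]
      simp only [pvAltGo, if_neg hmem, ih]
      push_cast [Multiset.card_cons]
      ring

-- A's gated accumulation over the keys is a sum of positive parts
lemma pv_foldl_pos_part (f g : String → Int) :
    ∀ (keys : List String) (m : Int),
      keys.foldl (fun m k => if f k > g k then m + (f k - g k) else m) m
        = m + (keys.map (fun k => max 0 (f k - g k))).sum := by
  intro keys
  induction keys with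
  | nil => intro m; simp
  | cons k rest ih =>
    intro m
    simp only [List.foldl_cons, List.map_cons, List.sum_cons, ih]
    by_cases h : f k > g k
    · rw [if_pos h]; have : max 0 (f k - g k) = f k - g k := by omega
      rw [this]; ring
    · rw [if_neg h]; have : max 0 (f k - g k) = 0 := by omega
      rw [this]; ring

-- the deficit sum over the distinct letters of word equals the multiset-difference size
lemma pv_sum_eq_card (input_letter word : List String) :
    ((PySem.Set.ofList word).map
        (fun k => max 0 ((word.count k : Int) - (input_letter.count k : Int)))).sum
      = (((word : Multiset String) - (input_letter : Multiset String)).card : Int) := by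
  classical
  set f : String → Int := fun k => max 0 ((word.count k : Int) - (input_letter.count k : Int)) with hf
  have hnd : (PySem.Set.ofList word).Nodup := by
    rw [← PySem.List.dedup_eq_ofList]; exact PySem.List.nodup_dedup word
  have hfin : (PySem.Set.ofList word).toFinset = word.toFinset := by
    ext a
    simp [List.mem_toFinset, ← PySem.List.dedup_eq_ofList, PySem.List.mem_dedup]
  have h1 : ((PySem.Set.ofList word).map f).sum = ∑ k ∈ (PySem.Set.ofList word).toFinset, f k :=
    (List.sum_toFinset f hnd).symm
  rw [h1, hfin]
  have h2 : ∀ k ∈ word.toFinset,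
      f k = ((word.count k - input_letter.count k : Nat) : Int) := by
    intro k _
    simp only [hf]
    omega
  rw [Finset.sum_congr rfl h2, ← Nat.cast_sum]
  congr 1
  have hcnt : ∀ (l : List String) (k : String),
      l.count k = Multiset.count k (l : Multiset String) := by
    intro l k; simp
  have h3 : ∑ k ∈ word.toFinset, (word.count k - input_letter.count k)
      = ∑ k ∈ word.toFinset, Multiset.count k ((word : Multiset String) - (input_letter : Multiset String)) := by
    refine Finset.sum_congr rfl ?_
    intro k _
    rw [Multiset.count_sub, hcnt, hcnt]
  rw [h3]
  have hsub : ((word : Multiset String) - (input_letter : Multiset String)).toFinset ⊆ word.toFinset := by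
    intro a ha
    rw [Multiset.mem_toFinset] at ha
    have : a ∈ (word : Multiset String) := Multiset.mem_of_le (Multiset.sub_le_self _ _) ha
    simpa [List.mem_toFinset] using this
  have h4 := Finset.sum_subset hsub (f := fun k => Multiset.count k ((word : Multiset String) - (input_letter : Multiset String)))
    (by intro x _ hx; rw [Multiset.mem_toFinset] at hx; exact Multiset.count_eq_zero.mpr hx)
  have h5 : (word : Multiset String).toFinset = word.toFinset := by simp
  simp only at h4
  rw [← h4, Multiset.toFinset_sum_count_eq]

-- ===== VERDICT (by name: the statement is the Claim_ definition above) =====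
theorem is_word_subset_input_spec : Claim_equal_is_word_subset_input := by
  intro input_letter word missing_limit _
  unfold Spec_is_word_subset_input is_word_subset_input is_word_subset_input_alt
  simp only [PySem.Dict.keys_counter, pv_foldl_pos_part, PySem.Dict.getD_counter,
    pvAltGo_eq, pv_sum_eq_card]
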